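-- pv_equiv track=rewrite | github.com/YanzhangJiang/Biocircuits-Explorer | webapp/scripts/query_path_ids.py | _base36_encode
-- ===== SOURCE A (Python) =====
-- def _base36_encode(value: int) -> str:
--     if value < 0:
--         raise ValueError("base36 requires a non-negative integer")
--     chars = "0123456789ABCDEFGHIJKLMNOPQRSTUVWXYZ"
--     if value == 0:
--         return "0"
--     out: list[str] = []
--     current = value
--     while current:
--         current, rem = divmod(current, 36)
--         out.append(chars[rem])
--     return "".join(reversed(out))
-- ===== SOURCE B (Python) =====
-- def _base36_encode(value: int) -> str:
--     if value < 0: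
--         raise ValueError("base36 requires a non-negative integer")
--     chars = "0123456789ABCDEFGHIJKLMNOPQRSTUVWXYZ"
--     if value < 36:
--         return chars[value]
--     return _base36_encode(value // 36) + chars[value % 36]
-- ===== Notes on version B (the rewrite author's own statement) =====
-- stated objective: simpler
-- what changed: Replaced the explicit while-loop with list accumulator plus reversed()/join by direct recursion that emits digits most-significant-first via the call stack (base case value < 36).
import Mathlib
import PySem

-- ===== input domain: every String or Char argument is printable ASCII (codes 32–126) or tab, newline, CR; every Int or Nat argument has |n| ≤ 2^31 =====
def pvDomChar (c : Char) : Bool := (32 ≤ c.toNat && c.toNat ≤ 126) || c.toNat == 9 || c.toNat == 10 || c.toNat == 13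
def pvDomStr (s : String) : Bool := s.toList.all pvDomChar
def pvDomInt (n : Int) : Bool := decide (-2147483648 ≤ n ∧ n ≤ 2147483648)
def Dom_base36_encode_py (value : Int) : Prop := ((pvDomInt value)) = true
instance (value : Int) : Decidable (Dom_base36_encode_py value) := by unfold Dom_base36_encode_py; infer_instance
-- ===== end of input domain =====

-- B changes the decomposition only: recursion emitting digits most-significant-first
-- instead of A's while-loop with a list accumulator and a final reversed()/join.

-- ===== PORT A =====
-- chars = "0123456789ABCDEFGHIJKLMNOPQRSTUVWXYZ" (as a list of chars; chars[i] = getD i)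
def pvChars : List Char := "0123456789ABCDEFGHIJKLMNOPQRSTUVWXYZ".toList

-- the while-loop: `while current: current, rem = divmod(current, 36); out.append(chars[rem])`.
-- Reached only with current ≥ 0 (negatives raise before the loop, excluded by Pre_),
-- where Python's truthiness test `while current` is `current ≤ 0` = stop.
def pvLoopA (current : Int) (out : List Char) : List Char :=
  if _h : current ≤ 0 then out
  else pvLoopA (PySem.Int.floordiv current 36)
       (out ++ [pvChars.getD (PySem.Int.mod current 36).toNat ' '])
termination_by current.toNat
decreasing_by
  rw [PySem.Int.floordiv_eq_ediv_of_pos (by norm_num)]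
  omega

def base36_encode_py (value : Int) : String :=
  if value < 0 then ""        -- Python raises ValueError here; excluded by Pre_
  else if value = 0 then "0"
  else String.ofList (pvLoopA value []).reverse   -- "".join(reversed(out))

-- ===== PORT B =====
-- recursive body after the negative guard (Source B)
def pvRecB (value : Int) : String :=
  if _h : value < 36 then String.ofList [pvChars.getD value.toNat ' ']   -- chars[value]
  else (pvRecB (PySem.Int.floordiv value 36)).push
       (pvChars.getD (PySem.Int.mod value 36).toNat ' ')            -- _base36_encode(value // 36) + chars[value % 36]
termination_by value.toNat
decreasing_by
  rw [PySem.Int.floordiv_eq_ediv_of_pos (by norm_num)]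
  omega

def base36_encode_py_alt (value : Int) : String :=
  if value < 0 then ""        -- Python raises ValueError here; excluded by Pre_
  else pvRecB value

-- ===== PRECONDITION & SPEC =====
-- Pre_ excludes negative value, on which A (and B) raise ValueError.
def Pre_base36_encode_py (value : Int) : Prop := 0 ≤ value
instance (value : Int) : Decidable (Pre_base36_encode_py value) := by unfold Pre_base36_encode_py; infer_instance
def pvWitness_base36_encode_py : Int := (5)

def Spec_base36_encode_py (value : Int) (out : String) : Prop := out = base36_encode_py_alt value
instance (value : Int) (out : String) : Decidable (Spec_base36_encode_py value out) := by unfold Spec_base36_encode_py; infer_instance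

-- ===== CLAIM (what is proved, stated in full; the proofs are below) =====
def Claim_equal_base36_encode_py : Prop := ∀ (value : Int), Dom_base36_encode_py value → Pre_base36_encode_py value → Spec_base36_encode_py value (base36_encode_py value)

-- ===== LEMMAS AND PROOFS =====

-- digits of n in base 36, least-significant first
def pvDigitsLSB : Nat → List Char
  | n => if h : n = 0 then [] else pvChars.getD (n % 36) ' ' :: pvDigitsLSB (n / 36)
decreasing_by exact Nat.div_lt_self (Nat.pos_of_ne_zero h) (by norm_num)

theorem pvLoopA_digits (n : Nat) : ∀ acc, pvLoopA (n : Int) acc = acc ++ pvDigitsLSB n := by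
  induction n using Nat.strong_induction_on with
  | _ n ih =>
    intro acc
    rw [pvLoopA, pvDigitsLSB]
    by_cases h0 : n = 0
    · simp [h0]
    · have hpos : ¬ ((n:Int) ≤ 0) := by
        simp only [not_le]; exact_mod_cast Nat.pos_of_ne_zero h0
      rw [dif_neg hpos, dif_neg h0]
      rw [show PySem.Int.floordiv (n:Int) 36 = ((n / 36 : Nat) : Int) from by
            exact_mod_cast PySem.Int.floordiv_natCast n 36,
          show PySem.Int.mod (n:Int) 36 = ((n % 36 : Nat) : Int) from by
            exact_mod_cast PySem.Int.mod_natCast n 36]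
      rw [ih (n / 36) (Nat.div_lt_self (Nat.pos_of_ne_zero h0) (by norm_num))]
      have hm : ((n:Int) % 36).toNat = n % 36 := by omega
      simp [hm]

theorem pvRecB_digits (n : Nat) (hn : 0 < n) :
    pvRecB (n : Int) = String.ofList (pvDigitsLSB n).reverse := by
  induction n using Nat.strong_induction_on with
  | _ n ih =>
    rw [pvRecB, pvDigitsLSB]
    rw [dif_neg (by omega : ¬ n = 0)]
    by_cases h : n < 36
    · rw [dif_pos (by exact_mod_cast h)]
      have h1 : n % 36 = n := Nat.mod_eq_of_lt h
      have h2 : n / 36 = 0 := Nat.div_eq_of_lt h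
      rw [h1, h2, pvDigitsLSB]
      simp
    · rw [dif_neg (by exact_mod_cast h)]
      rw [show PySem.Int.floordiv (n:Int) 36 = ((n / 36 : Nat) : Int) from by
            exact_mod_cast PySem.Int.floordiv_natCast n 36,
          show PySem.Int.mod (n:Int) 36 = ((n % 36 : Nat) : Int) from by
            exact_mod_cast PySem.Int.mod_natCast n 36]
      have hq : 0 < n / 36 := Nat.div_pos (by omega) (by norm_num)
      rw [ih (n / 36) (Nat.div_lt_self hn (by norm_num)) hq]
      have hm : ((n:Int) % 36).toNat = n % 36 := by omega
      apply String.toList_inj.mp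
      simp [hm]

-- ===== VERDICT (by name: the statement is the Claim_ definition above) =====
theorem base36_encode_py_spec : Claim_equal_base36_encode_py := by
  intro value _ hpre
  have hpre' : (0:Int) ≤ value := hpre
  unfold Spec_base36_encode_py base36_encode_py base36_encode_py_alt
  have hneg : ¬ value < 0 := not_lt.mpr hpre'
  rw [if_neg hneg, if_neg hneg]
  by_cases h0 : value = 0
  · subst h0
    rw [if_pos rfl, pvRecB, dif_pos (by norm_num)]
    apply String.toList_inj.mp
    simp [pvChars]
  · have hv : value = ((value.toNat : Nat) : Int) := (Int.toNat_of_nonneg hpre').symm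
    rw [if_neg h0, hv, pvLoopA_digits, pvRecB_digits value.toNat (by omega)]
    simp
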